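-- pv_equiv track=rewrite | github.com/alex-zaplik/ngs-seq-tool | backend/dataStructure.py | createDataStructure
-- ===== SOURCE A (Python) =====
-- def createDataStructure(resultList):
--     resDict = {}
--     for position in range(len(resultList[0])):
--         resDict[position] = {}
--         for code in ['C', 'A', 'T', 'G']:
--             resDict[position][code] = []
--             for x in resultList:
--                 if x[position] == code:
--                     resDict[position][code].append(x)
--     return resDict
-- ===== SOURCE B (Python) =====
-- def createDataStructure(resultList):
--     res = {}
--     for position in range(len(resultList[0])):
--         buckets = {code: [] for code in ('C', 'A', 'T', 'G')}
--         for x in resultList: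
--             c = x[position]
--             if c in buckets:
--                 buckets[c].append(x)
--         res[position] = buckets
--     return res
-- ===== Notes on version B (the rewrite author's own statement) =====
-- stated objective: faster
-- what changed: A scans the whole read list once per code (4 scans per position, appending matches per code); B makes a single bucketing pass per position, pre-creating the four 'C','A','T','G' buckets and dispatching each read to its bucket by its character.
import Mathlib
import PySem

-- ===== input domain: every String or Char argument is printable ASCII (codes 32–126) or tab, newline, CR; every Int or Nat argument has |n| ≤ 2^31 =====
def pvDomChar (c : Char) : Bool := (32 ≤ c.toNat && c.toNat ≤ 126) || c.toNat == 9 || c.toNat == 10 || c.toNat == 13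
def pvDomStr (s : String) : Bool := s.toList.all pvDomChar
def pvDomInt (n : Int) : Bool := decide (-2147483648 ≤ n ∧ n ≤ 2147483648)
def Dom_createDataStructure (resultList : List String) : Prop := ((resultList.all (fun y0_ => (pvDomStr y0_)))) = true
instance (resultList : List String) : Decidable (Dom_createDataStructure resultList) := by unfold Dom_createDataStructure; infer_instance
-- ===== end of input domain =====

-- B replaces A's four repeated scans of resultList per position by a single bucketing pass per
-- position into pre-created 'C','A','T','G' lists (objective: faster by a constant factor).

-- ===== PORT A =====
-- inner 'for x in resultList: if x[position] == code: append' loop of A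
def pvFilt (resultList : List String) (position : Int) (code : Char) : List String :=
  resultList.foldl
    (fun bucket x => if PySem.Str.pyGet? x position = some code then bucket ++ [x] else bucket) []

def createDataStructure (resultList : List String) : List (Int × List (String × List String)) :=
  (PySem.List.pyRange 0 (PySem.Str.len (resultList.headD "")) 1).foldl
    (fun resDict position =>
      resDict ++ [(position,
        (['C', 'A', 'T', 'G'] : List Char).foldl
          (fun posDict code => posDict ++ [(String.ofList [code], pvFilt resultList position code)])
          [])])
    []

-- ===== PORT B =====
-- buckets[c].append(x): append to the (unique) entry whose key is c
def pvAppendAt (bs : List (String × List String)) (k : String) (x : String) :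
    List (String × List String) :=
  match bs with
  | [] => []
  | (k', v) :: rest => if k' = k then (k', v ++ [x]) :: rest else (k', v) :: pvAppendAt rest k x

-- body of B's single pass over resultList (none = Python IndexError, outside Pre_)
def pvStep (position : Int) (buckets : List (String × List String)) (x : String) :
    List (String × List String) :=
  match PySem.Str.pyGet? x position with
  | none => buckets
  | some c =>
      if buckets.any (fun kv => kv.1 = String.ofList [c]) then
        pvAppendAt buckets (String.ofList [c]) x
      else buckets

def createDataStructure_alt (resultList : List String) : List (Int × List (String × List String)) :=
  (PySem.List.pyRange 0 (PySem.Str.len (resultList.headD "")) 1).map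
    (fun position =>
      (position,
        resultList.foldl (pvStep position)
          ((['C', 'A', 'T', 'G'] : List Char).map (fun c => (String.ofList [c], [])))))

-- ===== PRECONDITION & SPEC =====
-- Pre_ excludes exactly the inputs where Python A raises: the empty list (resultList[0] is an
-- IndexError) and lists where some read is shorter than the first one (x[position] IndexError).
def Pre_createDataStructure (resultList : List String) : Prop :=
  resultList ≠ [] ∧
    ∀ x ∈ resultList, PySem.Str.len (resultList.headD "") ≤ PySem.Str.len x
instance (resultList : List String) : Decidable (Pre_createDataStructure resultList) := by
  unfold Pre_createDataStructure; infer_instance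

def pvWitness_createDataStructure : List String := ["CA", "TG", "AX"]

def Spec_createDataStructure (resultList : List String) (out : List (Int × List (String × List String))) : Prop := out = createDataStructure_alt resultList
instance (resultList : List String) (out : List (Int × List (String × List String))) : Decidable (Spec_createDataStructure resultList out) := by unfold Spec_createDataStructure; infer_instance

-- ===== CLAIM (what is proved, stated in full; the proofs are below) =====
def Claim_equal_createDataStructure : Prop := ∀ (resultList : List String), Dom_createDataStructure resultList → Pre_createDataStructure resultList → Spec_createDataStructure resultList (createDataStructure resultList)

-- ===== LEMMAS AND PROOFS =====

-- A's inner loop is a filter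
theorem pvFilt_eq_filter (resultList : List String) (position : Int) (code : Char) :
    pvFilt resultList position code =
      resultList.filter (fun x => decide (PySem.Str.pyGet? x position = some code)) := by
  unfold pvFilt
  rw [PySem.List.foldl_append_ite_eq_filter]
  rfl

-- B's bucketing pass, with the four concrete keys, collects exactly A's four filters
theorem pvStep_inv (position : Int) (xs : List String) (l1 l2 l3 l4 : List String) :
    xs.foldl (pvStep position) [("C", l1), ("A", l2), ("T", l3), ("G", l4)] =
      [("C", l1 ++ xs.filter (fun x => decide (PySem.Str.pyGet? x position = some 'C'))),
       ("A", l2 ++ xs.filter (fun x => decide (PySem.Str.pyGet? x position = some 'A'))),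
       ("T", l3 ++ xs.filter (fun x => decide (PySem.Str.pyGet? x position = some 'T'))),
       ("G", l4 ++ xs.filter (fun x => decide (PySem.Str.pyGet? x position = some 'G')))] := by
  induction xs generalizing l1 l2 l3 l4 with
  | nil => simp
  | cons x xs ih =>
      simp only [List.foldl_cons, List.filter_cons]
      rcases h : PySem.List.pyGet? x.toList position with _ | c
      · rw [show pvStep position [("C", l1), ("A", l2), ("T", l3), ("G", l4)] x =
              [("C", l1), ("A", l2), ("T", l3), ("G", l4)] by simp [pvStep, PySem.Str.pyGet?, h]]
        simp [PySem.Str.pyGet?, h, ih]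
      · by_cases hC : c = 'C'
        · subst hC
          rw [show pvStep position [("C", l1), ("A", l2), ("T", l3), ("G", l4)] x =
                [("C", l1 ++ [x]), ("A", l2), ("T", l3), ("G", l4)] by
            simp [pvStep, PySem.Str.pyGet?, h, pvAppendAt]]
          simp [PySem.Str.pyGet?, h, ih]
        · by_cases hA : c = 'A'
          · subst hA
            rw [show pvStep position [("C", l1), ("A", l2), ("T", l3), ("G", l4)] x =
                  [("C", l1), ("A", l2 ++ [x]), ("T", l3), ("G", l4)] by
              simp [pvStep, PySem.Str.pyGet?, h, pvAppendAt]]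
            simp [PySem.Str.pyGet?, h, ih]
          · by_cases hT : c = 'T'
            · subst hT
              rw [show pvStep position [("C", l1), ("A", l2), ("T", l3), ("G", l4)] x =
                    [("C", l1), ("A", l2), ("T", l3 ++ [x]), ("G", l4)] by
                simp [pvStep, PySem.Str.pyGet?, h, pvAppendAt]]
              simp [PySem.Str.pyGet?, h, ih]
            · by_cases hG : c = 'G'
              · subst hG
                rw [show pvStep position [("C", l1), ("A", l2), ("T", l3), ("G", l4)] x =
                      [("C", l1), ("A", l2), ("T", l3), ("G", l4 ++ [x])] by
                  simp [pvStep, PySem.Str.pyGet?, h, pvAppendAt]]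
                simp [PySem.Str.pyGet?, h, ih]
              · have hkey : ¬("C" = String.ofList [c] ∨ "A" = String.ofList [c] ∨
                    "T" = String.ofList [c] ∨ "G" = String.ofList [c]) := by
                  rintro (he | he | he | he) <;>
                    first
                    | exact hC (Eq.symm (by simpa using congrArg String.toList he))
                    | exact hA (Eq.symm (by simpa using congrArg String.toList he))
                    | exact hT (Eq.symm (by simpa using congrArg String.toList he))
                    | exact hG (Eq.symm (by simpa using congrArg String.toList he))
                rw [show pvStep position [("C", l1), ("A", l2), ("T", l3), ("G", l4)] x =
                      [("C", l1), ("A", l2), ("T", l3), ("G", l4)] by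
                  simp [pvStep, PySem.Str.pyGet?, h, hkey]]
                simp [PySem.Str.pyGet?, h, hC, hA, hT, hG, ih]

-- the two ports agree on every input (the Pre_ hypotheses are not even needed for the equality)
theorem ports_agree (resultList : List String) :
    createDataStructure resultList = createDataStructure_alt resultList := by
  unfold createDataStructure createDataStructure_alt
  rw [PySem.List.foldl_append_singleton_eq_map
    (f := fun position =>
      (position,
        (['C', 'A', 'T', 'G'] : List Char).foldl
          (fun posDict code => posDict ++ [(String.ofList [code], pvFilt resultList position code)])
          []))]
  simp only [List.nil_append]
  refine List.map_congr_left ?_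
  intro position _
  simp only [List.foldl_cons, List.foldl_nil, List.nil_append, List.append_assoc,
    List.singleton_append, List.map_cons, List.map_nil]
  rw [show ((String.ofList ['C'], ([] : List String)) :: (String.ofList ['A'], ([] : List String)) ::
        (String.ofList ['T'], ([] : List String)) :: [(String.ofList ['G'], ([] : List String))]) =
      [("C", ([] : List String)), ("A", []), ("T", []), ("G", [])] from rfl]
  rw [pvStep_inv]
  simp [pvFilt_eq_filter]

-- ===== VERDICT (by name: the statement is the Claim_ definition above) =====
theorem createDataStructure_spec : Claim_equal_createDataStructure := by
  intro resultList _ _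
  unfold Spec_createDataStructure
  exact ports_agree resultList
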